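-- pv_equiv track=rewrite | github.com/ahihi102145/Python-core | BT_LOP/Tuần7/cntDigit.py | cnt_sum
-- ===== SOURCE A (Python) =====
-- def cnt_sum(n):
--     sum1 = 0
--     cnt =0
--
--     while n > 0:
--         sum1 += n % 10
--         n //= 10
--         cnt =cnt +1
--
--     return cnt, sum1
-- ===== SOURCE B (Python) =====
-- def cnt_sum(n):
--     if n <= 0:
--         return 0, 0
--     s = str(n)
--     return len(s), sum(int(d) for d in s)
-- ===== Notes on version B (the rewrite author's own statement) =====
-- stated objective: idiomatic
-- what changed: B replaces A's arithmetic while-loop (repeated modulus and floor-division with running count and sum accumulators) by reading the decimal string representation: its length is the digit count and summing its digit characters gives the digit sum, with a single guard for non-positive inputs where A's loop never runs.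
import Mathlib
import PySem

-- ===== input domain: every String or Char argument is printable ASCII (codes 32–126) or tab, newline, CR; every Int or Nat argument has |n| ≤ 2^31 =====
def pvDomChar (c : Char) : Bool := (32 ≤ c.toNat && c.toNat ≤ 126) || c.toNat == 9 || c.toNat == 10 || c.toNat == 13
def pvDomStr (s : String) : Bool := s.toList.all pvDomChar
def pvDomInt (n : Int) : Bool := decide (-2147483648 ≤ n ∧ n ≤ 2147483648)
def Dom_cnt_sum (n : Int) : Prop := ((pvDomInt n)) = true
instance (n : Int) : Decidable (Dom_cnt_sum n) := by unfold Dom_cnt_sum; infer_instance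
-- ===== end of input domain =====

-- B reads the digits of str(n) instead of A's arithmetic %/// loop; return values proved equal for all n.

-- ===== PORT A =====
-- the while-loop of A: state (n, cnt, sum1), iterates while n > 0
def cntSumLoop (n cnt sum1 : Int) : Int × Int :=
  if _h : 0 < n then
    cntSumLoop (PySem.Int.floordiv n 10) (cnt + 1) (sum1 + PySem.Int.mod n 10)
  else (cnt, sum1)
termination_by n.toNat
decreasing_by
  have h10 : PySem.Int.floordiv n 10 = ((n.toNat / 10 : Nat) : Int) := by
    have hn : n = ((n.toNat : Nat) : Int) := by omega
    rw [hn]; exact_mod_cast PySem.Int.floordiv_natCast n.toNat 10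
  omega

def cnt_sum (n : Int) : Int × Int := cntSumLoop n 0 0

-- ===== PORT B =====
-- int(d) for a single character d (always a decimal digit where B uses it)
def pyIntChar (c : Char) : Int := (PySem.Int.ofChars? [c]).getD 0

def cnt_sum_alt (n : Int) : Int × Int :=
  if n ≤ 0 then (0, 0)
  else
    let s := (PySem.Int.toStr n).toList
    ((s.length : Int), s.foldl (fun acc c => acc + pyIntChar c) 0)

-- ===== PRECONDITION & SPEC =====
def Spec_cnt_sum (n : Int) (out : Int × Int) : Prop := out = cnt_sum_alt n
instance (n : Int) (out : Int × Int) : Decidable (Spec_cnt_sum n out) := by unfold Spec_cnt_sum; infer_instance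

-- ===== CLAIM (what is proved, stated in full; the proofs are below) =====
def Claim_equal_cnt_sum : Prop := ∀ (n : Int), Dom_cnt_sum n → Spec_cnt_sum n (cnt_sum n)

-- ===== LEMMAS AND PROOFS =====

-- A's loop computes, over the natural number m, the base-10 digit count and digit sum.
theorem cntSumLoop_natCast (m : Nat) (cnt sum1 : Int) :
    cntSumLoop (m : Int) cnt sum1 =
      (cnt + ((Nat.digits 10 m).length : Int), sum1 + (((Nat.digits 10 m).map (Int.ofNat)).sum)) := by
  induction m using Nat.strong_induction_on generalizing cnt sum1 with
  | _ m ih =>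
    rw [cntSumLoop]
    by_cases hm : 0 < m
    · have hpos : (0 : Int) < (m : Int) := by exact_mod_cast hm
      have hfd : PySem.Int.floordiv (m : Int) 10 = ((m / 10 : Nat) : Int) := by
        exact_mod_cast PySem.Int.floordiv_natCast m 10
      have hmd : PySem.Int.mod (m : Int) 10 = ((m % 10 : Nat) : Int) := by
        exact_mod_cast PySem.Int.mod_natCast m 10
      rw [dif_pos hpos, hfd, hmd,
        ih (m / 10) (Nat.div_lt_self hm (by norm_num)),
        Nat.digits_def' (b := 10) (by norm_num) hm]
      simp [List.sum_cons, Prod.mk.injEq]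
      constructor <;> omega
    · have : m = 0 := by omega
      subst this
      simp

-- Nat.toDigitsCore, with enough fuel, produces the reversed digit characters onto the accumulator.
theorem toDigitsCore_eq_digits (f : Nat) : ∀ (m : Nat) (acc : List Char), 0 < m → m < f →
    Nat.toDigitsCore 10 f m acc = ((Nat.digits 10 m).map Nat.digitChar).reverse ++ acc := by
  induction f with
  | zero => intro m acc h1 h2; omega
  | succ f ih =>
    intro m acc h1 h2
    rw [Nat.toDigitsCore]
    by_cases hdiv : m / 10 = 0
    · simp only [hdiv, if_true]
      have hm10 : m < 10 := by omega
      rw [Nat.digits_def' (b := 10) (by norm_num) h1, hdiv]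
      have hmod : m % 10 = m := Nat.mod_eq_of_lt hm10
      simp [hmod]
    · simp only [hdiv, if_false]
      have hlt : m / 10 < f := by
        have := Nat.div_lt_self h1 (show 1 < 10 by norm_num)
        omega
      rw [ih (m / 10) _ (by omega) hlt,
        Nat.digits_def' (b := 10) (by norm_num) h1]
      simp

theorem toDigits_eq (m : Nat) (h : 0 < m) :
    Nat.toDigits 10 m = ((Nat.digits 10 m).map Nat.digitChar).reverse := by
  have := toDigitsCore_eq_digits (m + 1) m [] h (by omega)
  simpa [Nat.toDigits] using this

-- int(digitChar d) = d for a decimal digit value d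
theorem pyIntChar_digitChar (d : Nat) (hd : d < 10) :
    pyIntChar (Nat.digitChar d) = (d : Int) := by
  interval_cases d <;> decide

theorem foldl_add_map (g : Char → Int) : ∀ (l : List Char) (a : Int),
    l.foldl (fun acc c => acc + g c) a = a + (l.map g).sum := by
  intro l
  induction l with
  | nil => simp
  | cons x xs ih => intro a; simp [List.foldl_cons, ih]; ring

-- ===== VERDICT (by name: the statement is the Claim_ definition above) =====
theorem cnt_sum_spec : Claim_equal_cnt_sum := by
  intro n _
  unfold Spec_cnt_sum cnt_sum cnt_sum_alt
  by_cases hn : n ≤ 0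
  · rw [cntSumLoop, dif_neg (by omega), if_pos hn]
  · rw [if_neg hn]
    have hm : n = ((n.toNat : Nat) : Int) := by omega
    set m := n.toNat with hmdef
    have hmpos : 0 < m := by omega
    rw [hm, cntSumLoop_natCast m 0 0]
    have hchars : (PySem.Int.toStr ((m : Nat) : Int)).toList = Nat.toDigits 10 m := by
      rw [PySem.Int.toList_toStr, PySem.Int.toChars]
      rw [if_neg (by omega)]
      simp
    simp only [hchars, toDigits_eq m hmpos]
    rw [Prod.mk.injEq]
    constructor
    · simp
    · rw [foldl_add_map]
      have hmap : (((Nat.digits 10 m).map Nat.digitChar).reverse.map pyIntChar) =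
          ((Nat.digits 10 m).map (Int.ofNat)).reverse := by
        rw [← List.map_reverse, List.map_map, ← List.map_reverse]
        apply List.map_congr_left
        intro d hd
        rw [List.mem_reverse] at hd
        exact pyIntChar_digitChar d (Nat.digits_lt_base (by norm_num) hd)
      rw [hmap, List.sum_reverse]
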